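-- pv_equiv track=rewrite | github.com/beng0ldman/comp110-22s-workspace | exercises/ex06/dictionary.py | count
-- ===== SOURCE A (Python) =====
-- def count(xs: list[str]) -> dict[str, int]:
--     """Numbering keys of a list to make a dict."""
--     storage: dict[str, int] = dict()
--     for x in xs:
--         if x in storage:
--             storage[x] += 1
--         else:
--             storage[x] = 1
--     return storage
-- ===== SOURCE B (Python) =====
-- def count(xs: list[str]) -> dict[str, int]:
--     """Numbering keys of a list to make a dict."""
--     ys = sorted(xs)
--     cnt: dict[str, int] = {}
--     n = len(ys)
--     i = 0
--     while i < n: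
--         j = i + 1
--         while j < n and ys[j] == ys[i]:
--             j += 1
--         cnt[ys[i]] = j - i
--         i = j
--     return {x: cnt[x] for x in dict.fromkeys(xs)}
-- ===== Notes on version B (the rewrite author's own statement) =====
-- stated objective: alternative
-- what changed: B sorts a copy of xs and counts equal-element runs in one scan over the sorted list, then emits the counts in first-occurrence key order via dict.fromkeys, replacing A's per-element membership-test-and-increment dict loop.
import Mathlib
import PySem

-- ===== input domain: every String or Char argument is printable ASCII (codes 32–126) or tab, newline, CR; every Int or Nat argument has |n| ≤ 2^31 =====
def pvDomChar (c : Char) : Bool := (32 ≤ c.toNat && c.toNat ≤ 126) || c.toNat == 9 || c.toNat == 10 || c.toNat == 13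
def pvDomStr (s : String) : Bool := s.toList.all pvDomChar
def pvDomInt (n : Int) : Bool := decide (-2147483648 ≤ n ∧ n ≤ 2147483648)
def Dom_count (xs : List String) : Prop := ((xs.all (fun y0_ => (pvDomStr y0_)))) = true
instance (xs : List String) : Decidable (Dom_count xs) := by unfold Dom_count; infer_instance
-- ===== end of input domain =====

-- B counts equal-element runs in one scan over sorted(xs) and emits them in first-occurrence
-- key order; an alternative algorithm replacing A's membership-test-and-increment dict loop.

-- ===== PORT A =====
-- for x in xs: if x in storage: storage[x] += 1 else: storage[x] = 1; return storage
def count (xs : List String) : List (String × Int) :=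
  (xs.foldl (fun storage x =>
      if storage.contains x then storage.insert x (storage.getD x 0 + 1)
      else storage.insert x 1)
    (PySem.Dict.empty : PySem.Dict String Int)).items

-- ===== PORT B =====
-- the outer while loop over sorted ys: the inner 'while ys[j] == ys[i]: j += 1' scan is the
-- takeWhile/dropWhile split of the leading run; cnt[ys[i]] = j - i is the insert
def countRuns : List String → PySem.Dict String Int → PySem.Dict String Int
  | [], cnt => cnt
  | y :: rest, cnt =>
      countRuns (rest.dropWhile (fun z => z == y))
        (cnt.insert y (1 + (rest.takeWhile (fun z => z == y)).length))
termination_by ys _ => ys.length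
decreasing_by
  simpa using Nat.lt_succ_of_le (List.Sublist.length_le (List.dropWhile_sublist _))

-- ys = sorted(xs); cnt = run counts; {x: cnt[x] for x in dict.fromkeys(xs)}
def count_alt (xs : List String) : List (String × Int) :=
  let ys := PySem.List.sorted xs (fun x => x) false
  let cnt := countRuns ys PySem.Dict.empty
  (PySem.List.dedup xs).map (fun x => (x, cnt.getD x 0))

-- ===== PRECONDITION & SPEC =====
def Spec_count (xs : List String) (out : List (String × Int)) : Prop := out = count_alt xs
instance (xs : List String) (out : List (String × Int)) : Decidable (Spec_count xs out) := by unfold Spec_count; infer_instance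

-- ===== CLAIM (what is proved, stated in full; the proofs are below) =====
def Claim_equal_count : Prop := ∀ (xs : List String), Dom_count xs → Spec_count xs (count xs)

-- ===== LEMMAS AND PROOFS =====

-- A's loop body equals the unconditional 'insert x (getD x 0 + 1)' step
theorem count_step_eq :
    (fun (storage : PySem.Dict String Int) (x : String) =>
      if storage.contains x then storage.insert x (storage.getD x 0 + 1)
      else storage.insert x 1)
    = fun storage x => storage.insert x (storage.getD x 0 + 1) := by
  funext storage x
  split_ifs with h
  · rfl
  · rw [PySem.Dict.getD_of_not_contains _ _ (by simpa using h)]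
    norm_num

-- a sorted list y :: rest has no y left after the leading run is dropped
theorem not_mem_dropWhile_of_sorted (y : String) (rest : List String)
    (hp : (y :: rest).Pairwise (· ≤ ·)) :
    y ∉ rest.dropWhile (fun z => z == y) := by
  intro hy
  rcases hd : rest.dropWhile (fun z => z == y) with _ | ⟨h, t⟩
  · simp [hd] at hy
  · have hhd : ¬ (h == y) = true := by
      have := List.head?_dropWhile_not (fun z => z == y) rest
      rw [hd] at this; simpa using this
    have hne : h ≠ y := by simpa using hhd
    have hsub : (rest.dropWhile (fun z => z == y)).Sublist rest := List.dropWhile_sublist _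
    have hyle : ∀ z ∈ rest, y ≤ z := (List.pairwise_cons.mp hp).1
    have hylt : y < h := lt_of_le_of_ne (hyle h (hsub.subset (by simp [hd]))) (Ne.symm hne)
    have hpt : (h :: t).Pairwise (· ≤ ·) := by
      have := ((List.pairwise_cons.mp hp).2).sublist hsub
      rwa [hd] at this
    rw [hd] at hy
    rcases List.mem_cons.mp hy with hy | hy
    · exact hne hy.symm
    · exact absurd rfl (ne_of_gt (lt_of_lt_of_le hylt ((List.pairwise_cons.mp hpt).1 y hy)))

-- what the run-count loop computes: counts of ys on top of cnt, sorted ys keeping runs contiguous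
theorem countRuns_getD (ys : List String) (cnt : PySem.Dict String Int) (x : String)
    (hp : ys.Pairwise (· ≤ ·)) :
    (countRuns ys cnt).getD x 0 =
      if x ∈ ys then (ys.count x : Int) else cnt.getD x 0 := by
  induction ys, cnt using countRuns.induct with
  | case1 => simp [countRuns]
  | case2 y rest cnt ih =>
    rw [countRuns]
    have hrest := (List.pairwise_cons.mp hp).2
    have htail : (rest.dropWhile (fun z => z == y)).Pairwise (· ≤ ·) :=
      hrest.sublist (List.dropWhile_sublist _)
    rw [ih htail]
    have hsplit : rest = rest.takeWhile (fun z => z == y) ++ rest.dropWhile (fun z => z == y) :=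
      (List.takeWhile_append_dropWhile).symm
    have hynot : y ∉ rest.dropWhile (fun z => z == y) := not_mem_dropWhile_of_sorted y rest hp
    have hrestcnt : rest.count x =
        (rest.takeWhile (fun z => z == y)).count x + (rest.dropWhile (fun z => z == y)).count x := by
      conv_lhs => rw [hsplit]
      rw [List.count_append]
    by_cases hx : x ∈ rest.dropWhile (fun z => z == y)
    · -- x lies in a later run: x ≠ y, and its count in y :: rest is its count in the tail
      have hxy : x ≠ y := fun h => hynot (h ▸ hx)
      have hxmem : x ∈ y :: rest := by
        refine List.mem_cons_of_mem _ ?_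
        rw [hsplit]; exact List.mem_append_right _ hx
      have hrun0 : (rest.takeWhile (fun z => z == y)).count x = 0 :=
        List.count_eq_zero_of_not_mem (fun hm => hxy (by simpa using List.mem_takeWhile_imp hm))
      have hcnt : (y :: rest).count x = (rest.dropWhile (fun z => z == y)).count x := by
        rw [List.count_cons_of_ne (Ne.symm hxy), hrestcnt, hrun0]
        omega
      rw [if_pos hx, if_pos hxmem, hcnt]
    · rw [if_neg hx, PySem.Dict.getD_insert]
      by_cases hxy : x = y
      · -- x is the head's run: its count is the run length
        subst hxy
        have hrun : (rest.takeWhile (fun z => z == x)).count x =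
            (rest.takeWhile (fun z => z == x)).length :=
          List.count_eq_length.mpr (by
            intro b hb
            have h2 := List.mem_takeWhile_imp hb
            simp only [beq_iff_eq] at h2
            exact h2.symm)
        have htail0 : (rest.dropWhile (fun z => z == x)).count x = 0 :=
          List.count_eq_zero_of_not_mem hynot
        have hcnt : (x :: rest).count x = 1 + (rest.takeWhile (fun z => z == x)).length := by
          rw [List.count_cons_self, hrestcnt, hrun, htail0]
          omega
        rw [if_pos rfl, if_pos (List.mem_cons_self), hcnt]
        push_cast
        ring
      · -- x occurs nowhere in y :: rest
        have hxmem : x ∉ y :: rest := by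
          rw [hsplit]
          simp only [List.mem_cons, List.mem_append, not_or]
          exact ⟨hxy, fun hm => hxy (by simpa using List.mem_takeWhile_imp hm), hx⟩
        rw [if_neg hxy, if_neg hxmem]

-- ===== VERDICT (by name: the statement is the Claim_ definition above) =====
theorem count_spec : Claim_equal_count := by
  intro xs _
  show count xs = count_alt xs
  unfold count count_alt
  rw [count_step_eq, PySem.Dict.foldl_insert_getD_add_one_eq_counter,
      PySem.Dict.items_counter, PySem.List.dedup_eq_ofList]
  refine List.map_congr_left (fun x hx => ?_)
  have hxs : x ∈ xs := (PySem.Set.mem_ofList xs x).mp hx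
  have hp : (PySem.List.sorted xs (fun x => x) false).Pairwise (· ≤ ·) := by
    simpa using PySem.List.sorted_pairwise (xs := xs) (key := fun x => x)
  rw [countRuns_getD _ _ _ hp,
      if_pos ((PySem.List.mem_sorted xs (fun x => x) false x).mpr hxs),
      (PySem.List.sorted_perm xs (fun x => x) false).count_eq x]
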